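-- pv_equiv track=rewrite | github.com/ArcadeGannon123/snkk-segment-fw | utils/segment_model.py | completar_array
-- ===== SOURCE A (Python) =====
-- def completar_array(ultimo_volumen, secuencia_imagenes, longitud_deseada, long_secuencia):
--     """Completa el último volumen recortado de la secuencia de imagenes con los fotogramas iniciales para llegar a la longitud deseada"""
--     long_actual = len(ultimo_volumen)
--     miss_frames = longitud_deseada - long_actual # Fotogramas faltantes
--     init_seq = 0
--     for _ in range(miss_frames):
--         if init_seq >= long_secuencia:
--             init_seq = 0
--
--         ultimo_volumen.append(secuencia_imagenes[init_seq]) # Añade los fotogramas faltantes en el volumen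
--         init_seq +=1
--     return ultimo_volumen
-- ===== SOURCE B (Python) =====
-- def completar_array(ultimo_volumen, secuencia_imagenes, longitud_deseada, long_secuencia):
--     """Completa el ultimo volumen en bloque: cociente/resto sobre la longitud del ciclo."""
--     miss_frames = longitud_deseada - len(ultimo_volumen)
--     if miss_frames <= 0:
--         return ultimo_volumen
--     periodo = long_secuencia if long_secuencia > 0 else 1
--     bloque = secuencia_imagenes[:periodo]
--     q, r = divmod(miss_frames, periodo)
--     ultimo_volumen.extend(bloque * q + bloque[:r])
--     return ultimo_volumen
-- ===== Notes on version B (the rewrite author's own statement) =====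
-- stated objective: alternative
-- what changed: Replaces A's per-frame wrap-around index loop with a bulk construction: take the cycle block once, split the missing length with divmod into whole repetitions plus a remainder prefix, and extend the list in one call.
import Mathlib
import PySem

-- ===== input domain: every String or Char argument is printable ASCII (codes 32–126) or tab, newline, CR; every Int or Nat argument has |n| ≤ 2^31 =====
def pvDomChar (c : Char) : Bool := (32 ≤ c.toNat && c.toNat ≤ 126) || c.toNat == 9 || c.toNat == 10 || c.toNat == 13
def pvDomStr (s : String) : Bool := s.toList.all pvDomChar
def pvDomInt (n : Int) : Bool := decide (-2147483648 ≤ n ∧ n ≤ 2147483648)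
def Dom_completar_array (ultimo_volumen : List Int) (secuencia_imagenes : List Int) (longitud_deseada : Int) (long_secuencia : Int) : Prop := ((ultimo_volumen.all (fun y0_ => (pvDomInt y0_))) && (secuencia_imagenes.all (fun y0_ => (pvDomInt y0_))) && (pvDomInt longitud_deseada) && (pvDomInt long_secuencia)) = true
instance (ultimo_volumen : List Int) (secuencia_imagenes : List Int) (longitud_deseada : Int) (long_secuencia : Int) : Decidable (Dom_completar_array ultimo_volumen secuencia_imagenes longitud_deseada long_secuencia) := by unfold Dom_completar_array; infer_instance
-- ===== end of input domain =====

-- B pads the volume in bulk (divmod into whole cycle repetitions plus a remainder prefix) instead of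
-- A's per-frame wrap-around index loop; both mutate ultimo_volumen in Python (A by append, B by extend)
-- and the equivalence proved here is about the returned value.

-- ===== PORT A =====
def completar_array (ultimo_volumen : List Int) (secuencia_imagenes : List Int) (longitud_deseada : Int) (long_secuencia : Int) : List Int :=
  let long_actual : Int := ultimo_volumen.length
  let miss_frames : Int := longitud_deseada - long_actual
  let st := (PySem.List.pyRange 0 miss_frames 1).foldl
    (fun (s : List Int × Int) _ =>
      let init_seq : Int := if s.2 ≥ long_secuencia then 0 else s.2
      -- secuencia_imagenes[init_seq]: in range under Pre_, so pyGetD is exact there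
      (s.1 ++ [PySem.List.pyGetD secuencia_imagenes init_seq 0], init_seq + 1))
    (ultimo_volumen, 0)
  st.1

-- ===== PORT B =====
def completar_array_alt (ultimo_volumen : List Int) (secuencia_imagenes : List Int) (longitud_deseada : Int) (long_secuencia : Int) : List Int :=
  let miss_frames : Int := longitud_deseada - ultimo_volumen.length
  if miss_frames ≤ 0 then ultimo_volumen
  else
    let periodo : Int := if long_secuencia > 0 then long_secuencia else 1
    let bloque := PySem.List.slice secuencia_imagenes none (some periodo)
    let q := PySem.Int.floordiv miss_frames periodo
    let r := PySem.Int.mod miss_frames periodo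
    ultimo_volumen ++ (PySem.List.pyRepeat bloque q ++ PySem.List.slice bloque none (some r))

-- ===== PRECONDITION & SPEC =====
-- Pre_ excludes exactly the inputs on which A raises IndexError: frames are missing and the
-- wrap-around index reaches past the end of secuencia_imagenes.
def Pre_completar_array (ultimo_volumen : List Int) (secuencia_imagenes : List Int) (longitud_deseada : Int) (long_secuencia : Int) : Prop :=
  longitud_deseada - (ultimo_volumen.length : Int) ≤ 0 ∨
    min (longitud_deseada - (ultimo_volumen.length : Int)) (max long_secuencia 1) ≤ (secuencia_imagenes.length : Int)
instance (ultimo_volumen : List Int) (secuencia_imagenes : List Int) (longitud_deseada : Int) (long_secuencia : Int) : Decidable (Pre_completar_array ultimo_volumen secuencia_imagenes longitud_deseada long_secuencia) := by unfold Pre_completar_array; infer_instance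
def pvWitness_completar_array : List Int × List Int × Int × Int := ([1, 2], [3, 4, 5], 6, 3)

def Spec_completar_array (ultimo_volumen : List Int) (secuencia_imagenes : List Int) (longitud_deseada : Int) (long_secuencia : Int) (out : List Int) : Prop := out = completar_array_alt ultimo_volumen secuencia_imagenes longitud_deseada long_secuencia
instance (ultimo_volumen : List Int) (secuencia_imagenes : List Int) (longitud_deseada : Int) (long_secuencia : Int) (out : List Int) : Decidable (Spec_completar_array ultimo_volumen secuencia_imagenes longitud_deseada long_secuencia out) := by unfold Spec_completar_array; infer_instance

-- ===== CLAIM (what is proved, stated in full; the proofs are below) =====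
def Claim_equal_completar_array : Prop := ∀ (ultimo_volumen : List Int) (secuencia_imagenes : List Int) (longitud_deseada : Int) (long_secuencia : Int), Dom_completar_array ultimo_volumen secuencia_imagenes longitud_deseada long_secuencia → Pre_completar_array ultimo_volumen secuencia_imagenes longitud_deseada long_secuencia → Spec_completar_array ultimo_volumen secuencia_imagenes longitud_deseada long_secuencia (completar_array ultimo_volumen secuencia_imagenes longitud_deseada long_secuencia)
-- ===== LEMMAS AND PROOFS =====

-- the effective cycle length of A's index (1 when long_secuencia ≤ 0, since init_seq resets every step)
def pvP (ls : Int) : Nat := (max ls 1).toNat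
-- the frame appended at step k
def pvF (si : List Int) (p : Nat) (k : Nat) : Int := si.getD (k % p) 0
-- A's stored init_seq after k completed steps
def pvJ (p : Nat) (k : Nat) : Int := if k = 0 then 0 else (((k - 1) % p + 1 : Nat) : Int)

lemma pvP_pos (ls : Int) : 0 < pvP ls := by unfold pvP; omega

lemma pvP_cast (ls : Int) : ((pvP ls : Nat) : Int) = max ls 1 := by unfold pvP; omega

lemma succ_mod (m p : Nat) (hp : 0 < p) : (m + 1) % p = (m % p + 1) % p := by
  rcases Nat.lt_or_ge 1 p with h | h
  · rw [Nat.add_mod m 1 p, Nat.mod_eq_of_lt h]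
  · have : p = 1 := by omega
    simp [this]

-- the index A actually uses at step k is k % pvP ls
lemma pvJ_step (ls : Int) (k : Nat) :
    (if pvJ (pvP ls) k ≥ ls then 0 else pvJ (pvP ls) k) = ((k % pvP ls : Nat) : Int) := by
  have hp := pvP_pos ls
  have hc := pvP_cast ls
  unfold pvJ
  rcases k with _ | m
  · split_ifs <;> simp_all
  · have ht : m % pvP ls < pvP ls := Nat.mod_lt m hp
    have hmod : (m + 1) % pvP ls = (m % pvP ls + 1) % pvP ls := succ_mod m _ hp
    simp only [Nat.add_sub_cancel, Nat.succ_ne_zero, if_false]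
    by_cases hfull : m % pvP ls + 1 = pvP ls
    · have h1 : (m + 1) % pvP ls = 0 := by rw [hmod, hfull, Nat.mod_self]
      rw [if_pos (by omega), h1]
      simp
    · have h1 : (m + 1) % pvP ls = m % pvP ls + 1 := by
        rw [hmod, Nat.mod_eq_of_lt (by omega)]
      rw [if_neg (by omega), h1]

-- invariant of A's loop: after processing any L from state (acc, pvJ k) the result is the cycle map
lemma foldA_steps (si : List Int) (ls : Int) :
    ∀ (L : List Int) (k : Nat) (acc : List Int),
      L.foldl (fun (s : List Int × Int) _ =>
          let init_seq : Int := if s.2 ≥ ls then 0 else s.2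
          (s.1 ++ [PySem.List.pyGetD si init_seq 0], init_seq + 1)) (acc, pvJ (pvP ls) k)
        = (acc ++ (List.range' k L.length).map (pvF si (pvP ls)), pvJ (pvP ls) (k + L.length)) := by
  intro L
  induction L with
  | nil => intro k acc; simp
  | cons x L ih =>
    intro k acc
    simp only [List.foldl_cons]
    have hused := pvJ_step ls k
    have hnext : (if pvJ (pvP ls) k ≥ ls then 0 else pvJ (pvP ls) k) + 1 = pvJ (pvP ls) (k + 1) := by
      rw [hused]; unfold pvJ; simp
    have hget : PySem.List.pyGetD si (if pvJ (pvP ls) k ≥ ls then 0 else pvJ (pvP ls) k) 0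
        = pvF si (pvP ls) k := by
      rw [hused, PySem.List.pyGetD_natCast]; rfl
    simp only [hget, hnext]
    rw [ih (k + 1) (acc ++ [pvF si (pvP ls) k])]
    simp only [List.length_cons, List.range'_succ, List.map_cons]
    rw [show k + 1 + L.length = k + (L.length + 1) by omega]
    simp [List.append_assoc]

lemma take_eq_map_range (si : List Int) (n : Nat) (h : n ≤ si.length) :
    si.take n = (List.range n).map (fun k => si.getD k 0) := by
  apply List.ext_getElem
  · simp [h]
  · intro i h1 h2
    simp only [List.getElem_take, List.getElem_map, List.getElem_range]
    rw [List.getD_eq_getElem si 0 (by simp at h1; omega)]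

-- the quotient/remainder bulk construction equals the cycle map
lemma cycle_eq (si : List Int) (p : Nat) (hp : 0 < p) :
    ∀ (n : Nat), min n p ≤ si.length →
      (List.replicate (n / p) (si.take p)).flatten ++ (si.take p).take (n % p)
        = (List.range n).map (pvF si p) := by
  intro n
  induction n using Nat.strong_induction_on with
  | _ n ih =>
    intro h
    rcases Nat.lt_or_ge n p with hlt | hge
    · have hq : n / p = 0 := Nat.div_eq_of_lt hlt
      have hr : n % p = n := Nat.mod_eq_of_lt hlt
      have hn : n ≤ si.length := by omega
      rw [hq, hr]
      simp only [List.replicate_zero, List.flatten_nil, List.nil_append]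
      rw [List.take_take, Nat.min_eq_left (by omega), take_eq_map_range si n hn]
      apply List.map_congr_left
      intro k hk
      simp only [List.mem_range] at hk
      unfold pvF
      rw [Nat.mod_eq_of_lt (by omega)]
    · have hple : p ≤ si.length := by omega
      have hq : n / p = (n - p) / p + 1 := Nat.div_eq_sub_div hp hge
      have hr : n % p = (n - p) % p := by
        conv_lhs => rw [show n = (n - p) + p by omega]
        rw [Nat.add_mod_right]
      have hsplit : n = p + (n - p) := by omega
      rw [hq, hr, List.replicate_succ, List.flatten_cons, List.append_assoc]
      rw [ih (n - p) (by omega) (by omega)]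
      conv_rhs => rw [hsplit, List.range_add, List.map_append, List.map_map]
      congr 1
      · rw [take_eq_map_range si p hple]
        apply List.map_congr_left
        intro k hk
        simp only [List.mem_range] at hk
        unfold pvF
        rw [Nat.mod_eq_of_lt hk]
      · apply List.map_congr_left
        intro k _
        unfold pvF
        simp [Nat.add_mod_left]

-- ===== VERDICT (by name: the statement is the Claim_ definition above) =====
theorem completar_array_spec : Claim_equal_completar_array := by
  intro uv si ld ls _hdom hpre
  unfold Spec_completar_array completar_array completar_array_alt
  dsimp only
  by_cases hm : ld - (uv.length : Int) ≤ 0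
  · rw [if_pos hm, PySem.List.pyRange_one_eq_nil hm]
    simp
  · rw [if_neg hm]
    have hm' : 0 < ld - (uv.length : Int) := by omega
    have hp := pvP_pos ls
    have hpc := pvP_cast ls
    have hcn : ld - (uv.length : Int) = (((ld - (uv.length : Int)).toNat : Nat) : Int) := by omega
    generalize hN : (ld - (uv.length : Int)).toNat = n at hcn
    have hper : (if ls > 0 then ls else 1) = ((pvP ls : Nat) : Int) := by
      rw [hpc]; split_ifs <;> omega
    have hmin : min n (pvP ls) ≤ si.length := by
      unfold Pre_completar_array at hpre; omega
    have hlen : (PySem.List.pyRange 0 (ld - (uv.length : Int)) 1).length = n := by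
      rw [PySem.List.length_pyRange_one]; omega
    have hJ0 : pvJ (pvP ls) 0 = 0 := by unfold pvJ; simp
    have hA := foldA_steps si ls (PySem.List.pyRange 0 (ld - (uv.length : Int)) 1) 0 uv
    rw [hJ0] at hA
    rw [hA]
    simp only [hlen]
    rw [hper, hcn]
    rw [PySem.List.slice_to_natCast]
    simp only [PySem.Int.floordiv_natCast, PySem.Int.mod_natCast]
    rw [PySem.List.slice_to_natCast]
    unfold PySem.List.pyRepeat
    simp only [Int.toNat_natCast]
    rw [← List.range_eq_range']
    rw [← cycle_eq si (pvP ls) hp n hmin]
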